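-- pv_equiv track=rewrite | github.com/modal-labs/pytest-markdown-docs | src/pytest_markdown_docs/plugin.py | parse_superfences_block_info
-- ===== SOURCE A (Python) =====
-- import typing
--
-- def parse_superfences_block_info(block_info: str) -> typing.List[str]:
--     """Parse PyMdown Superfences block info syntax.
--
--     The default `python continuation` format is not compatible with Material for Mkdocs.
--     But, PyMdown Superfences has a special brace format to add options to code fence blocks: `{.<lang> <option1> <option2>}`.
--
--     This function also works if the default syntax is used to allow for mixed usage.
--     """
--     block_info = block_info.strip()
--
--     if not block_info.startswith("{"):
--         # default syntax
--         return block_info.split()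
--
--     block_info = block_info.strip("{}")
--     code_info = block_info.split()
--     # Lang may not be the first but is always the first element that starts with a dot.
--     # (https://facelessuser.github.io/pymdown-extensions/extensions/superfences/#injecting-classes-ids-and-attributes)
--     dot_lang = next(
--         (info_part for info_part in code_info if info_part.startswith(".")), None
--     )
--     if dot_lang:
--         code_info.remove(dot_lang)
--         lang = dot_lang[1:]
--         code_info.insert(0, lang)
--     return code_info
-- ===== SOURCE B (Python) =====
-- import typing
--
-- def parse_superfences_block_info(block_info: str) -> typing.List[str]:
--     block_info = block_info.strip()
--
--     if not block_info.startswith("{"):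
--         # default syntax
--         return block_info.split()
--
--     toks = block_info.strip("{}").split()
--     # locate the first dotted token (the lang); no list mutation anywhere
--     hit = next((entry for entry in enumerate(toks) if entry[1].startswith(".")), None)
--     if hit is None:
--         return toks
--     i, dotted = hit
--     # rebuild the result from slices, promoting the dot-stripped lang to the front
--     return [dotted[1:], *toks[:i], *toks[i + 1:]]
-- ===== Notes on version B (the rewrite author's own statement) =====
-- stated objective: simpler
-- what changed: Replaces A's mutation of the token list (find the dotted token, list.remove it, list.insert the lang at the front) by a mutation-free version: locate the index of the first dotted token with enumerate and rebuild the whole result in one expression from slices toks[:i] and toks[i+1:].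
import Mathlib
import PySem

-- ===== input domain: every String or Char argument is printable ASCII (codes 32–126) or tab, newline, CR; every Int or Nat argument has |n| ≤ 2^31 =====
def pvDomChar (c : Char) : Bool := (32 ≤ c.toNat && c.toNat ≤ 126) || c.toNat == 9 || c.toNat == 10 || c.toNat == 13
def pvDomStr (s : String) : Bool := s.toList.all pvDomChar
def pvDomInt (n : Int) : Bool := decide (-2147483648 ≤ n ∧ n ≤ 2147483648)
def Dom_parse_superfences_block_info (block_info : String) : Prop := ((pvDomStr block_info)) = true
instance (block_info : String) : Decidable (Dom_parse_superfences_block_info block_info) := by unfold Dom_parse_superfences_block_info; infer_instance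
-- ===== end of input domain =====

-- B is mutation-free: instead of A's find / list.remove / list.insert manipulation it
-- locates the index of the first dotted token and rebuilds the result from slices (simpler).

-- ===== PORT A =====
def parse_superfences_block_info (block_info : String) : List String :=
  let bi := PySem.Str.strip block_info
  if !(PySem.Str.startswith bi "{") then
    -- default syntax
    PySem.Str.split₀ bi
  else
    let bi2 := PySem.Str.stripChars bi "{}"
    let code_info := PySem.Str.split₀ bi2
    let dot_lang := code_info.find? (fun t => PySem.Str.startswith t ".")
    match dot_lang with
    | some dl =>
      if dl ≠ "" then      -- Python truthiness `if dot_lang:` (dot_lang is a string here)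
        let code_info' := (PySem.List.remove? code_info dl).getD code_info  -- dl ∈ code_info, so remove? never fails
        let lang := PySem.Str.slice dl (some 1) none                        -- dot_lang[1:]
        PySem.List.insert code_info' 0 lang
      else code_info
    | none => code_info

-- ===== PORT B =====
def parse_superfences_block_info_alt (block_info : String) : List String :=
  let bi := PySem.Str.strip block_info
  if !(PySem.Str.startswith bi "{") then
    -- default syntax
    PySem.Str.split₀ bi
  else
    let toks := PySem.Str.split₀ (PySem.Str.stripChars bi "{}")
    -- next((entry for entry in enumerate(toks) if entry[1].startswith(".")), None)
    match (PySem.List.enumerate toks 0).find? (fun e => PySem.Str.startswith e.2 ".") with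
    | none => toks
    | some (i, dotted) =>
        -- [dotted[1:], *toks[:i], *toks[i+1:]]
        PySem.Str.slice dotted (some 1) none ::
          (PySem.List.slice toks none (some i) ++ PySem.List.slice toks (some (i + 1)) none)

-- ===== PRECONDITION & SPEC =====
def Spec_parse_superfences_block_info (block_info : String) (out : List String) : Prop := out = parse_superfences_block_info_alt block_info
instance (block_info : String) (out : List String) : Decidable (Spec_parse_superfences_block_info block_info out) := by unfold Spec_parse_superfences_block_info; infer_instance

-- ===== CLAIM (what is proved, stated in full; the proofs are below) =====
def Claim_equal_parse_superfences_block_info : Prop := ∀ (block_info : String), Dom_parse_superfences_block_info block_info → Spec_parse_superfences_block_info block_info (parse_superfences_block_info block_info)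

-- ===== LEMMAS AND PROOFS =====

theorem startswith_dot_ne_empty (t : String) (h : PySem.Str.startswith t "." = true) : t ≠ "" := by
  intro he; subst he; simp [PySem.Str.startswith, PySem.Chars.startswith] at h

/-- The enumerate-based search of B against the plain `find?` / `remove?` of A. -/
theorem enumFind (p : String → Bool) : ∀ (ts : List String) (s : Int),
    match (PySem.List.enumerate ts s).find? (fun e => p e.2) with
    | none => ts.find? p = none
    | some (i, dotted) => ts.find? p = some dotted ∧ s ≤ i ∧
        ts.take (i - s).toNat ++ ts.drop ((i - s).toNat + 1)
          = (PySem.List.remove? ts dotted).getD ts := by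
  intro ts
  induction ts with
  | nil => intro s; simp [PySem.List.enumerate_nil]
  | cons t ts ih =>
    intro s
    rw [PySem.List.enumerate_cons]
    by_cases hp : p t = true
    · rw [List.find?_cons_of_pos (by simpa using hp)]
      refine ⟨by rw [List.find?_cons_of_pos hp], le_refl s, ?_⟩
      simp [PySem.List.remove?_cons_self]
    · rw [List.find?_cons_of_neg (by simpa using hp)]
      have ih' := ih (s + 1)
      cases hf : (PySem.List.enumerate ts (s + 1)).find? (fun e => p e.2) with
      | none =>
        rw [hf] at ih'
        rw [List.find?_cons_of_neg (by simpa using hp), ih']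
      | some e =>
        obtain ⟨i, dotted⟩ := e
        rw [hf] at ih'
        obtain ⟨hfind, hle, heq⟩ := ih'
        have hpd : p dotted = true := by
          have := List.find?_some hfind; simpa using this
        have htd : t ≠ dotted := fun he => by subst he; exact hp hpd
        have hmem : dotted ∈ ts := List.mem_of_find?_eq_some hfind
        obtain ⟨r, hr⟩ : ∃ r, PySem.List.remove? ts dotted = some r :=
          ⟨ts.erase dotted, PySem.List.remove?_eq_some_erase ts dotted hmem⟩
        refine ⟨by rw [List.find?_cons_of_neg (by simpa using hp), hfind], by omega, ?_⟩
        have hk : (i - s).toNat = (i - (s + 1)).toNat + 1 := by omega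
        rw [hk]
        simp only [List.take_succ_cons, List.drop_succ_cons, List.cons_append]
        rw [PySem.List.remove?_cons_of_ne ts htd, hr]
        rw [hr] at heq
        simpa using heq

theorem parse_superfences_block_info_spec : Claim_equal_parse_superfences_block_info := by
  intro s _
  show parse_superfences_block_info s = parse_superfences_block_info_alt s
  simp only [parse_superfences_block_info, parse_superfences_block_info_alt]
  by_cases h : PySem.Str.startswith (PySem.Str.strip s) "{" = true
  · rw [if_neg (by simp at h ⊢; exact h), if_neg (by simp at h ⊢; exact h)]
    generalize PySem.Str.split₀ (PySem.Str.stripChars (PySem.Str.strip s) "{}") = ts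
    have key := enumFind (fun t => PySem.Str.startswith t ".") ts 0
    cases hf : (PySem.List.enumerate ts 0).find? (fun e => PySem.Str.startswith e.2 ".") with
    | none =>
      rw [hf] at key
      rw [key]
    | some e =>
      obtain ⟨i, dotted⟩ := e
      rw [hf] at key
      obtain ⟨hfind, hle, heq⟩ := key
      have hpd : PySem.Str.startswith dotted "." = true := by
        have := List.find?_some hfind; simpa using this
      have hne : dotted ≠ "" := startswith_dot_ne_empty dotted hpd
      rw [hfind]
      have h0 : (i - 0).toNat = i.toNat := by omega
      have h1 : (i + 1).toNat = i.toNat + 1 := by omega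
      rw [h0] at heq
      simp only [hne, ne_eq, not_false_eq_true, if_true, PySem.List.insert_zero,
        PySem.List.slice_to _ hle, PySem.List.slice_from _ (by omega : (0:Int) ≤ i + 1),
        h1, ← heq]
  · rw [if_pos (by simp at h ⊢; exact h), if_pos (by simp at h ⊢; exact h)]
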